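-- pv_equiv track=rewrite | github.com/Jip-van-Sommeren/Inspectiondrone | Jip/gantt.py | split_consecutive_subarrays
-- ===== SOURCE A (Python) =====
-- def split_consecutive_subarrays(arr: list) -> list[list]:
--     subarrays: list[list] = []
--     current_subarray: list[int] = [arr[0]]
--
--     for i in range(1, len(arr)):
--         if arr[i] == current_subarray[-1] + 1:
--             current_subarray.append(arr[i])
--         else:
--             subarrays.append(current_subarray)
--             current_subarray = [arr[i]]
--
--     subarrays.append(current_subarray)
--     return subarrays
-- ===== SOURCE B (Python) =====
-- def split_consecutive_subarrays(arr: list) -> list[list]: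
--     cuts = [0] + [i for i in range(1, len(arr)) if arr[i] != arr[i - 1] + 1] + [len(arr)]
--     return [arr[a:b] for a, b in zip(cuts, cuts[1:])]
-- ===== Notes on version B (the rewrite author's own statement) =====
-- stated objective: alternative
-- what changed: B computes the list of cut indices (positions where consecutiveness breaks) in one comprehension and returns the slices between adjacent cuts, instead of accumulating elements into a growing current buffer.
import Mathlib
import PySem

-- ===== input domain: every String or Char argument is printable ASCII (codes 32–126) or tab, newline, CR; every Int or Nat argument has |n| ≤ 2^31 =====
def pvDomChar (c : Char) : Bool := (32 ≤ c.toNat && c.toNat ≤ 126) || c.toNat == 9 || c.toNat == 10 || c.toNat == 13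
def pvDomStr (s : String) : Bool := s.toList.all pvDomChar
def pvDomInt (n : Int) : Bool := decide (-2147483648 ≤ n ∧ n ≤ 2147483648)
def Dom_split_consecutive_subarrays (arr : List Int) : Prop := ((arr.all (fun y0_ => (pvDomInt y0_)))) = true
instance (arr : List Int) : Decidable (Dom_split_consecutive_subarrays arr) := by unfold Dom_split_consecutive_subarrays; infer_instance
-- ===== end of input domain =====

-- B splits by cut indices + slicing instead of A's running buffer; same O(n) cost, different decomposition.

-- ===== PORT A =====
-- loop body of A: state = (subarrays, current_subarray), x = arr[i]
def aStep (st : List (List Int) × List Int) (x : Int) : List (List Int) × List Int :=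
  if x = PySem.List.pyGetD st.2 (-1) 0 + 1 then (st.1, st.2 ++ [x])
  else (st.1 ++ [st.2], [x])

def split_consecutive_subarrays (arr : List Int) : List (List Int) :=
  match PySem.List.pyGet? arr 0 with
  | none => []   -- arr[0] raises IndexError on []: excluded by Pre_
  | some a0 =>
    let st := (PySem.List.pyRange 1 (arr.length : Int) 1).foldl
      (fun st i => aStep st (PySem.List.pyGetD arr i 0)) ([], [a0])
    st.1 ++ [st.2]

-- ===== PORT B =====
-- helper: the 'cuts' list of Source B (boundary indices where consecutiveness breaks)
def bCuts (arr : List Int) : List Int :=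
  [(0 : Int)] ++
    ((PySem.List.pyRange 1 (arr.length : Int) 1).filter
      (fun i => PySem.List.pyGetD arr i 0 != PySem.List.pyGetD arr (i - 1) 0 + 1)) ++
    [(arr.length : Int)]

def split_consecutive_subarrays_alt (arr : List Int) : List (List Int) :=
  let cuts := bCuts arr
  (cuts.zip (PySem.List.slice cuts (some 1) none)).map
    (fun p => PySem.List.slice arr (some p.1) (some p.2))

-- ===== PRECONDITION & SPEC =====
-- Pre_ excludes only the empty list, on which A's 'arr[0]' raises IndexError.
def Pre_split_consecutive_subarrays (arr : List Int) : Prop := arr ≠ []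
instance (arr : List Int) : Decidable (Pre_split_consecutive_subarrays arr) := by unfold Pre_split_consecutive_subarrays; infer_instance
def pvWitness_split_consecutive_subarrays : List Int := ([1, 2, 4])

def Spec_split_consecutive_subarrays (arr : List Int) (out : List (List Int)) : Prop := out = split_consecutive_subarrays_alt arr
instance (arr : List Int) (out : List (List Int)) : Decidable (Spec_split_consecutive_subarrays arr out) := by unfold Spec_split_consecutive_subarrays; infer_instance

-- ===== CLAIM (what is proved, stated in full; the proofs are below) =====
def Claim_equal_split_consecutive_subarrays : Prop := ∀ (arr : List Int), Dom_split_consecutive_subarrays arr → Pre_split_consecutive_subarrays arr → Spec_split_consecutive_subarrays arr (split_consecutive_subarrays arr)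

-- ===== LEMMAS AND PROOFS =====

def gstep (r : List (List Int)) (x : Int) : List (List Int) :=
  match r.getLast? with
  | none => [[x]]
  | some g => if x = PySem.List.pyGetD g (-1) 0 + 1 then r.dropLast ++ [g ++ [x]] else r ++ [[x]]

def ref (arr : List Int) : List (List Int) := arr.foldl gstep []

theorem A_drop (a0 : Int) (t : List Int) :
    split_consecutive_subarrays (a0 :: t) =
      (let st := t.foldl aStep ([], [a0]); st.1 ++ [st.2]) := by
  unfold split_consecutive_subarrays
  rw [PySem.List.pyGet?_zero_cons]
  show (have st := List.foldl (fun st i => aStep st (PySem.List.pyGetD (a0 :: t) i 0)) ([], [a0])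
          (PySem.List.pyRange 1 ((a0 :: t).length : Int)); st.1 ++ [st.2]) = _
  rw [PySem.List.foldl_pyRange_pyGetD' (a0 :: t) 0 aStep ([], [a0]) (by norm_num : (0:Int) ≤ 1)]
  rfl

theorem A_rec (arr : List Int) (x : Int) (h : arr ≠ []) :
    split_consecutive_subarrays (arr ++ [x]) = gstep (split_consecutive_subarrays arr) x := by
  obtain ⟨a0, t, rfl⟩ : ∃ a0 t, arr = a0 :: t := by
    cases arr with | nil => exact absurd rfl h | cons a t => exact ⟨a, t, rfl⟩
  rw [show (a0 :: t) ++ [x] = a0 :: (t ++ [x]) from rfl, A_drop, A_drop]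
  simp only [List.foldl_append, List.foldl_cons, List.foldl_nil]
  set st := t.foldl aStep ([], [a0]) with hst
  show (aStep st x).1 ++ [(aStep st x).2] = gstep (st.1 ++ [st.2]) x
  unfold aStep gstep
  rw [List.getLast?_append_cons]
  simp only [List.getLast?_singleton]
  split_ifs with hc
  · simp
  · simp

theorem A_ref (arr : List Int) (h : arr ≠ []) : split_consecutive_subarrays arr = ref arr := by
  induction arr using List.reverseRecOn with
  | nil => exact absurd rfl h
  | append_singleton ys x ih =>
    by_cases hy : ys = []
    · subst hy
      rw [show ([] ++ [x] : List Int) = [x] from rfl, A_drop]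
      simp [ref, gstep]
    · rw [A_rec ys x hy, ih hy]
      unfold ref
      rw [List.foldl_append, List.foldl_cons, List.foldl_nil]


def slicesOf (arr cs : List Int) : List (List Int) :=
  (cs.zip cs.tail).map (fun p => PySem.List.slice arr (some p.1) (some p.2))

theorem B_eq (arr : List Int) : split_consecutive_subarrays_alt arr = slicesOf arr (bCuts arr) := by
  simp [split_consecutive_subarrays_alt, slicesOf, PySem.List.slice_from_one]

theorem slicesOf_cons₂ (arr : List Int) (c1 c2 : Int) (cs : List Int) :
    slicesOf arr (c1 :: c2 :: cs) = PySem.List.slice arr (some c1) (some c2) :: slicesOf arr (c2 :: cs) := rfl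

theorem pyGetD_app_lt (arr : List Int) (x : Int) {i : Int} (h0 : 0 ≤ i) (h1 : i < (arr.length : Int)) :
    PySem.List.pyGetD (arr ++ [x]) i 0 = PySem.List.pyGetD arr i 0 := by
  rw [PySem.List.pyGetD_eq_getElem _ _ h0 (by simp; omega),
      PySem.List.pyGetD_eq_getElem _ _ h0 h1, List.getElem_append_left (by omega)]

theorem slice_app_le (arr : List Int) (x : Int) {a b : Int} (h0 : 0 ≤ a) (ha : a ≤ (arr.length : Int))
    (h1 : 0 ≤ b) (h2 : b ≤ (arr.length : Int)) :
    PySem.List.slice (arr ++ [x]) (some a) (some b) = PySem.List.slice arr (some a) (some b) := by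
  rw [PySem.List.slice_toNat _ h0 h1, PySem.List.slice_toNat _ h0 h1,
      List.drop_append_of_le_length (by omega)]
  exact List.take_append_of_le_length (by simp; omega)

theorem slice_app_ext (arr : List Int) (x : Int) {a : Int} (h0 : 0 ≤ a) (h2 : a ≤ (arr.length : Int)) :
    PySem.List.slice (arr ++ [x]) (some a) (some ((arr.length : Int) + 1)) =
      PySem.List.slice arr (some a) (some (arr.length : Int)) ++ [x] := by
  rw [PySem.List.slice_toNat _ h0 (by omega), PySem.List.slice_toNat _ h0 (by omega),
      List.drop_append_of_le_length (by omega),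
      List.take_of_length_le (l := List.drop a.toNat arr ++ [x]) (by simp; omega),
      List.take_of_length_le (l := List.drop a.toNat arr) (by simp)]

def bF (arr : List Int) : List Int :=
  (PySem.List.pyRange 1 (arr.length : Int) 1).filter
    (fun i => PySem.List.pyGetD arr i 0 != PySem.List.pyGetD arr (i - 1) 0 + 1)

theorem bCuts_eq (arr : List Int) : bCuts arr = [(0 : Int)] ++ bF arr ++ [(arr.length : Int)] := rfl

theorem bF_mem (arr : List Int) {i : Int} (hi : i ∈ bF arr) : 1 ≤ i ∧ i < (arr.length : Int) := by
  unfold bF at hi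
  exact PySem.List.mem_pyRange_one.mp (List.mem_of_mem_filter hi)

theorem bF_app (arr : List Int) (x : Int) (h : arr ≠ []) :
    bF (arr ++ [x]) = bF arr ++
      (if x = arr.getLast h + 1 then [] else [(arr.length : Int)]) := by
  have hpos : 0 < arr.length := List.length_pos_iff.mpr h
  have hx : PySem.List.pyGetD (arr ++ [x]) (arr.length : Int) 0 = x := by
    simp [PySem.List.pyGetD_natCast]
  have hprev : PySem.List.pyGetD (arr ++ [x]) ((arr.length : Int) - 1) 0 = arr.getLast h := by
    rw [pyGetD_app_lt _ _ (by omega) (by omega),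
        show ((arr.length : Int) - 1) = ((arr.length - 1 : Nat) : Int) by omega,
        PySem.List.pyGetD_natCast, List.getD_eq_getElem _ _ (by omega), List.getLast_eq_getElem]
  unfold bF
  rw [show (((arr ++ [x]).length : Int)) = (arr.length : Int) + 1 by simp,
      PySem.List.pyRange_one_succ_right (by omega), List.filter_append]
  congr 1
  · apply List.filter_congr
    intro i hi
    have hm := PySem.List.mem_pyRange_one.mp hi
    rw [pyGetD_app_lt _ _ (by omega) (by omega), pyGetD_app_lt _ _ (by omega) (by omega)]
  · rw [List.filter_cons, List.filter_nil]
    simp only [hx, hprev]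
    by_cases hx2 : x = arr.getLast h + 1
    · simp [hx2]
    · simp [hx2]

theorem slicesOf_chain_ne_nil (arr : List Int) (c e : Int) (cs : List Int) :
    slicesOf arr ((c :: cs) ++ [e]) ≠ [] := by
  cases cs <;> simp [slicesOf]

theorem slicesOf_last (arr : List Int) (e : Int) : ∀ (cs : List Int) (c : Int),
    (slicesOf arr ((c :: cs) ++ [e])).getLast? =
      some (PySem.List.slice arr (some ((c :: cs).getLast (List.cons_ne_nil c cs))) (some e)) := by
  intro cs
  induction cs with
  | nil => intro c; rfl
  | cons c2 cs ih =>
    intro c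
    rw [show ((c :: c2 :: cs) ++ [e]) = c :: ((c2 :: cs) ++ [e]) from rfl,
        show (c :: ((c2 :: cs) ++ [e])) = c :: c2 :: (cs ++ [e]) from rfl, slicesOf_cons₂]
    rw [show (c2 :: (cs ++ [e])) = (c2 :: cs) ++ [e] from rfl]
    have hne := slicesOf_chain_ne_nil arr c2 e cs
    obtain ⟨y, ys, hys⟩ := List.exists_cons_of_ne_nil hne
    rw [hys, List.getLast?_cons_cons, ← hys, ih c2, List.getLast_cons (List.cons_ne_nil c2 cs)]

theorem chainExt (arr : List Int) (x : Int) : ∀ (cs : List Int) (c : Int), 0 ≤ c →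
    c < (arr.length : Int) → (∀ e ∈ cs, 0 ≤ e ∧ e < (arr.length : Int)) →
    slicesOf (arr ++ [x]) ((c :: cs) ++ [(arr.length : Int) + 1]) =
      (slicesOf arr ((c :: cs) ++ [(arr.length : Int)])).dropLast ++
        [PySem.List.slice arr (some ((c :: cs).getLast (List.cons_ne_nil c cs)))
          (some (arr.length : Int)) ++ [x]] := by
  intro cs
  induction cs with
  | nil =>
    intro c h0 h1 _
    simp [slicesOf, slice_app_ext arr x h0 (le_of_lt h1)]
  | cons c2 cs ih =>
    intro c h0 h1 hb
    obtain ⟨h20, h21⟩ := hb c2 (by simp)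
    rw [show ((c :: c2 :: cs) ++ [(arr.length : Int) + 1]) = c :: ((c2 :: cs) ++ [(arr.length : Int) + 1]) from rfl]
    rw [show (c :: ((c2 :: cs) ++ [(arr.length : Int) + 1])) = c :: c2 :: (cs ++ [(arr.length : Int) + 1]) from rfl,
        slicesOf_cons₂]
    rw [show (c2 :: (cs ++ [(arr.length : Int) + 1])) = (c2 :: cs) ++ [(arr.length : Int) + 1] from rfl]
    rw [ih c2 h20 h21 (fun e he => hb e (by simp [he])),
        slice_app_le arr x h0 (by omega) h20 (by omega)]
    rw [show ((c :: c2 :: cs) ++ [(arr.length : Int)]) = c :: c2 :: (cs ++ [(arr.length : Int)]) from rfl,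
        slicesOf_cons₂]
    rw [show (c2 :: (cs ++ [(arr.length : Int)])) = (c2 :: cs) ++ [(arr.length : Int)] from rfl]
    rw [List.dropLast_cons_of_ne_nil (slicesOf_chain_ne_nil arr c2 _ cs),
        List.getLast_cons (List.cons_ne_nil c2 cs)]
    rfl

theorem chainCut (arr : List Int) (x : Int) : ∀ (cs : List Int) (c : Int), 0 ≤ c →
    c < (arr.length : Int) → (∀ e ∈ cs, 0 ≤ e ∧ e < (arr.length : Int)) →
    slicesOf (arr ++ [x]) ((c :: cs) ++ [(arr.length : Int), (arr.length : Int) + 1]) =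
      slicesOf arr ((c :: cs) ++ [(arr.length : Int)]) ++ [[x]] := by
  intro cs
  induction cs with
  | nil =>
    intro c h0 h1 _
    have he : PySem.List.slice (arr ++ [x]) (some (arr.length : Int)) (some ((arr.length : Int) + 1)) = [x] := by
      rw [slice_app_ext arr x (by omega) (by omega)]
      rw [PySem.List.slice_toNat _ (by omega) (by omega)]
      simp
    have h2 := slice_app_le arr x (a := c) (b := (arr.length : Int)) h0 (by omega) (by omega) (by omega)
    simp [slicesOf, h2, he]
  | cons c2 cs ih =>
    intro c h0 h1 hb
    obtain ⟨h20, h21⟩ := hb c2 (by simp)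
    rw [show ((c :: c2 :: cs) ++ [(arr.length : Int), (arr.length : Int) + 1]) = c :: c2 :: (cs ++ [(arr.length : Int), (arr.length : Int) + 1]) from rfl,
        slicesOf_cons₂]
    rw [show (c2 :: (cs ++ [(arr.length : Int), (arr.length : Int) + 1])) = (c2 :: cs) ++ [(arr.length : Int), (arr.length : Int) + 1] from rfl]
    rw [ih c2 h20 h21 (fun e he => hb e (by simp [he])),
        slice_app_le arr x h0 (by omega) h20 (by omega)]
    rw [show ((c :: c2 :: cs) ++ [(arr.length : Int)]) = c :: c2 :: (cs ++ [(arr.length : Int)]) from rfl,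
        slicesOf_cons₂]
    rfl

theorem gstep_eq (r : List (List Int)) (x : Int) (g : List Int) (hg : r.getLast? = some g) :
    gstep r x = if x = PySem.List.pyGetD g (-1) 0 + 1 then r.dropLast ++ [g ++ [x]] else r ++ [[x]] := by
  unfold gstep
  rw [hg]

theorem B_rec (arr : List Int) (x : Int) (h : arr ≠ []) :
    split_consecutive_subarrays_alt (arr ++ [x]) = gstep (split_consecutive_subarrays_alt arr) x := by
  have hpos : 0 < arr.length := List.length_pos_iff.mpr h
  rw [B_eq, B_eq, bCuts_eq, bCuts_eq, bF_app arr x h,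
      show (((arr ++ [x]).length : Int)) = (arr.length : Int) + 1 by simp]
  have hlast := slicesOf_last arr (arr.length : Int) (bF arr) 0
  have hcl := List.getLast_mem (List.cons_ne_nil (0 : Int) (bF arr))
  set cl := (0 :: bF arr).getLast (List.cons_ne_nil (0 : Int) (bF arr)) with hcl_def
  have hclb : 0 ≤ cl ∧ cl < (arr.length : Int) := by
    rcases List.mem_cons.mp hcl with h0 | hmem
    · constructor <;> omega
    · have := bF_mem arr hmem; constructor <;> omega
  have hg : PySem.List.slice arr (some cl) (some (arr.length : Int)) = List.drop cl.toNat arr := by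
    rw [PySem.List.slice_toNat _ hclb.1 (by omega)]
    exact List.take_of_length_le (by simp)
  have hgne : PySem.List.slice arr (some cl) (some (arr.length : Int)) ≠ [] := by
    rw [hg, ← List.length_pos_iff, List.length_drop]
    omega
  have hglast : PySem.List.pyGetD (PySem.List.slice arr (some cl) (some (arr.length : Int))) (-1) 0 = arr.getLast h := by
    rw [PySem.List.pyGetD_neg_one _ _ hgne]
    have h1 : (PySem.List.slice arr (some cl) (some (arr.length : Int))).getLast? = arr.getLast? := by
      rw [hg, List.getLast?_drop, if_neg (by omega)]
    rw [List.getLast?_eq_some_getLast hgne, List.getLast?_eq_some_getLast h] at h1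
    exact Option.some.inj h1
  have hbound : ∀ e ∈ bF arr, 0 ≤ e ∧ e < (arr.length : Int) := by
    intro e he; have := bF_mem arr he; constructor <;> omega
  rw [gstep_eq _ _ _ (by rw [show ([(0:Int)] ++ bF arr ++ [(arr.length : Int)]) = (0 :: bF arr) ++ [(arr.length : Int)] from rfl]; exact hlast), hglast]
  by_cases hx2 : x = arr.getLast h + 1
  · rw [if_pos hx2, if_pos hx2,
        show ([(0:Int)] ++ (bF arr ++ []) ++ [(arr.length : Int) + 1]) = (0 :: bF arr) ++ [(arr.length : Int) + 1] by simp,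
        show ([(0:Int)] ++ bF arr ++ [(arr.length : Int)]) = (0 :: bF arr) ++ [(arr.length : Int)] from rfl]
    exact chainExt arr x (bF arr) 0 le_rfl (by omega) hbound
  · rw [if_neg hx2, if_neg hx2,
        show ([(0:Int)] ++ (bF arr ++ [(arr.length : Int)]) ++ [(arr.length : Int) + 1]) = (0 :: bF arr) ++ [(arr.length : Int), (arr.length : Int) + 1] by simp,
        show ([(0:Int)] ++ bF arr ++ [(arr.length : Int)]) = (0 :: bF arr) ++ [(arr.length : Int)] from rfl]
    exact chainCut arr x (bF arr) 0 le_rfl (by omega) hbound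

theorem B_ref (arr : List Int) (h : arr ≠ []) : split_consecutive_subarrays_alt arr = ref arr := by
  induction arr using List.reverseRecOn with
  | nil => exact absurd rfl h
  | append_singleton ys x ih =>
    by_cases hy : ys = []
    · subst hy
      rw [show ([] ++ [x] : List Int) = [x] from rfl, B_eq]
      have hb : bCuts [x] = [0, 1] := by
        rw [bCuts_eq]
        simp [bF, PySem.List.pyRange_one_eq_nil]
      rw [hb]
      simp [slicesOf, ref, gstep, PySem.List.slice_toNat]
    · rw [B_rec ys x hy, ih hy]
      unfold ref
      rw [List.foldl_append, List.foldl_cons, List.foldl_nil]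

-- ===== VERDICT (by name: the statement is the Claim_ definition above) =====
theorem split_consecutive_subarrays_spec : Claim_equal_split_consecutive_subarrays := by
  intro arr _ hpre
  unfold Spec_split_consecutive_subarrays
  rw [A_ref arr hpre, B_ref arr hpre]
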